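-- pv_equiv track=rewrite | github.com/andreasdri/TDT4136 | exercise3/subA-1.py | getAB
-- ===== SOURCE A (Python) =====
-- def getAB(matrix):
--     # Goes over a matrix and returns location of A and B
--     A, B = (0,0), (0,0)
--     for y in range(0, len(matrix)):
--         for x in range(0, len(matrix[y])):
--             if(matrix[y][x] == 'A'):
--                 A = (x, y)
--             elif (matrix[y][x] == 'B'):
--                 B = (x, y)
--     return A, B
-- ===== SOURCE B (Python) =====
-- def getAB(matrix):
--     # Reverse scan with early exit: first hit in reverse order = last occurrence forward.
--     A, B = (0, 0), (0, 0)
--     found_a = found_b = False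
--     for y in range(len(matrix) - 1, -1, -1):
--         row = matrix[y]
--         for x in range(len(row) - 1, -1, -1):
--             c = row[x]
--             if not found_a and c == 'A':
--                 A = (x, y)
--                 found_a = True
--             elif not found_b and c == 'B':
--                 B = (x, y)
--                 found_b = True
--             if found_a and found_b:
--                 return A, B
--     return A, B
-- ===== Notes on version B (the rewrite author's own statement) =====
-- stated objective: alternative
-- what changed: B traverses the matrix in reverse (bottom-right to top-left) with found-flags and an early exit on the first A and first B hit, instead of A's forward full scan that overwrites the positions on every occurrence.
import Mathlib
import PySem

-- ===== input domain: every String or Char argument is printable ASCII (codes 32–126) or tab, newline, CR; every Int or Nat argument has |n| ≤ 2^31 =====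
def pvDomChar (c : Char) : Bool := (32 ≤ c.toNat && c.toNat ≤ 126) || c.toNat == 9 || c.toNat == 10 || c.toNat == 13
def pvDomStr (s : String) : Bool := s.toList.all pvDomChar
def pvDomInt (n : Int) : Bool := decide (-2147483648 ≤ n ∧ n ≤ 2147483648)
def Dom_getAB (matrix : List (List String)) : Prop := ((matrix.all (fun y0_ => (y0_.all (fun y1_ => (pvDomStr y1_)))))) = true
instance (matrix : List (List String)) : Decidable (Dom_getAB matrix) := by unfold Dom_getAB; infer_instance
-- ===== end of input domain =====

-- B scans the matrix in reverse with found-flags and an early exit; same last-occurrence positions as A's forward overwrite scan (alternative decomposition, no speed claim).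


-- ===== PORT A =====
-- forward nested scan; matrix[y] / row[x] rendered with getD — indices come from
-- range(len(·)) so they are always in range and the default is never consulted.
def getAB (matrix : List (List String)) : (Int × Int) × (Int × Int) :=
  (List.range matrix.length).foldl
    (fun st (y : Nat) =>
      let row := matrix.getD y []
      (List.range row.length).foldl
        (fun st (x : Nat) =>
          if row.getD x "" = "A" then (((x : Int), (y : Int)), st.2)
          else if row.getD x "" = "B" then (st.1, ((x : Int), (y : Int)))
          else st)
        st)
    ((0, 0), (0, 0))

-- ===== PORT B =====
-- state: ((A, B), (found_a, found_b))
def pvState : Type := ((Int × Int) × (Int × Int)) × (Bool × Bool)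

def pvStep (c : String) (x y : Nat) (st : pvState) : pvState :=
  if !st.2.1 && c == "A" then ((((x : Int), (y : Int)), st.1.2), (true, st.2.2))
  else if !st.2.2 && c == "B" then ((st.1.1, ((x : Int), (y : Int))), (st.2.1, true))
  else st

-- inner loop: x from n-1 down to 0; second component = early `return` taken
def pvRowLoop (row : List String) (y : Nat) : Nat → pvState → pvState × Bool
  | 0, st => (st, false)
  | x + 1, st =>
      let st' := pvStep (row.getD x "") x y st
      if st'.2.1 && st'.2.2 then (st', true)
      else pvRowLoop row y x st'

-- outer loop: y from n-1 down to 0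
def pvColLoop (matrix : List (List String)) : Nat → pvState → pvState
  | 0, st => st
  | y + 1, st =>
      let r := pvRowLoop (matrix.getD y []) y (matrix.getD y []).length st
      if r.2 then r.1 else pvColLoop matrix y r.1

def getAB_alt (matrix : List (List String)) : (Int × Int) × (Int × Int) :=
  (pvColLoop matrix matrix.length (((0, 0), (0, 0)), (false, false))).1

-- ===== PRECONDITION & SPEC =====
def Spec_getAB (matrix : List (List String)) (out : (Int × Int) × (Int × Int)) : Prop := out = getAB_alt matrix
instance (matrix : List (List String)) (out : (Int × Int) × (Int × Int)) : Decidable (Spec_getAB matrix out) := by unfold Spec_getAB; infer_instance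

-- ===== CLAIM (what is proved, stated in full; the proofs are below) =====
def Claim_equal_getAB : Prop := ∀ (matrix : List (List String)), Dom_getAB matrix → Spec_getAB matrix (getAB matrix)

-- ===== LEMMAS AND PROOFS =====

-- cells of the matrix in A's (forward) visiting order: (position, content)
def pvRowCells (row : List String) (y : Nat) : List ((Int × Int) × String) :=
  (List.range row.length).map (fun (x : Nat) => (((x : Int), (y : Int)), row.getD x ""))

def pvCellsUpTo (matrix : List (List String)) (n : Nat) : List ((Int × Int) × String) :=
  (List.range n).flatMap (fun y => pvRowCells (matrix.getD y []) y)

-- pvStep, seen as acting on a prebuilt cell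
def pvCStep (c : (Int × Int) × String) (st : pvState) : pvState :=
  if !st.2.1 && c.2 == "A" then ((c.1, st.1.2), (true, st.2.2))
  else if !st.2.2 && c.2 == "B" then ((st.1.1, c.1), (st.2.1, true))
  else st

-- flag-guarded sequential run with early exit, over a flat cell list (B's reference)
def pvFlagRun : List ((Int × Int) × String) → pvState → pvState
  | [], st => st
  | c :: l, st =>
      let st' := pvCStep c st
      if st'.2.1 && st'.2.2 then st' else pvFlagRun l st'

theorem pvFlagRun_both (l : List ((Int × Int) × String)) (st : pvState)
    (h1 : st.2.1 = true) (h2 : st.2.2 = true) : pvFlagRun l st = st := by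
  cases l with
  | nil => rfl
  | cons c l => simp [pvFlagRun, pvCStep, h1, h2]

theorem pvFlagRun_append (l1 l2 : List ((Int × Int) × String)) (st : pvState) :
    pvFlagRun (l1 ++ l2) st = pvFlagRun l2 (pvFlagRun l1 st) := by
  induction l1 generalizing st with
  | nil => rfl
  | cons c l1 ih =>
    simp only [List.cons_append, pvFlagRun]
    by_cases h : ((pvCStep c st).2.1 && (pvCStep c st).2.2) = true
    · rw [if_pos h, if_pos h,
        pvFlagRun_both l2 _ (Bool.and_eq_true _ _ ▸ h).1 (Bool.and_eq_true _ _ ▸ h).2]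
    · rw [if_neg h, if_neg h, ih]

-- inner loop = pvFlagRun over the reversed row-cell prefix; done flag ⇒ both flags set
theorem pvRowLoop_eq (row : List String) (y : Nat) :
    ∀ (x : Nat) (st : pvState),
      (pvRowLoop row y x st).1 =
        pvFlagRun (((List.range x).map
          (fun (i : Nat) => (((i : Int), (y : Int)), row.getD i ""))).reverse) st ∧
      ((pvRowLoop row y x st).2 = true →
        (pvRowLoop row y x st).1.2.1 = true ∧ (pvRowLoop row y x st).1.2.2 = true) := by
  intro x
  induction x with
  | zero => intro st; exact ⟨rfl, by simp [pvRowLoop]⟩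
  | succ x ih =>
    intro st
    have hrev : ((List.range (x + 1)).map
          (fun (i : Nat) => (((i : Int), (y : Int)), row.getD i ""))).reverse
        = (((x : Int), (y : Int)), row.getD x "") ::
          ((List.range x).map (fun (i : Nat) => (((i : Int), (y : Int)), row.getD i ""))).reverse := by
      simp [List.range_succ]
    rw [hrev]
    have hstep : pvStep (row.getD x "") x y st = pvCStep (((x : Int), (y : Int)), row.getD x "") st := rfl
    simp only [pvRowLoop, pvFlagRun, hstep]
    by_cases h : ((pvCStep (((x : Int), (y : Int)), row.getD x "") st).2.1 &&
                  (pvCStep (((x : Int), (y : Int)), row.getD x "") st).2.2) = true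
    · rw [if_pos h, if_pos h]
      exact ⟨rfl, fun _ => ⟨(Bool.and_eq_true _ _ ▸ h).1, (Bool.and_eq_true _ _ ▸ h).2⟩⟩
    · rw [if_neg h, if_neg h]
      exact ih _

theorem pvRowCells_def (row : List String) (y : Nat) :
    pvRowCells row y
      = (List.range row.length).map (fun (i : Nat) => (((i : Int), (y : Int)), row.getD i "")) := rfl

-- outer loop = pvFlagRun over the reversed cell list of the first n rows
theorem pvColLoop_eq (matrix : List (List String)) :
    ∀ (n : Nat) (st : pvState),
      pvColLoop matrix n st = pvFlagRun ((pvCellsUpTo matrix n).reverse) st := by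
  intro n
  induction n with
  | zero => intro st; rfl
  | succ n ih =>
    intro st
    have hcells : (pvCellsUpTo matrix (n + 1)).reverse
        = (pvRowCells (matrix.getD n []) n).reverse ++ (pvCellsUpTo matrix n).reverse := by
      simp [pvCellsUpTo, List.range_succ]
    rw [hcells, pvFlagRun_append]
    have hr := pvRowLoop_eq (matrix.getD n []) n (matrix.getD n []).length st
    rw [← pvRowCells_def] at hr
    simp only [pvColLoop]
    by_cases h : (pvRowLoop (matrix.getD n []) n (matrix.getD n []).length st).2 = true
    · rw [if_pos h]
      have hb := hr.2 h
      rw [hr.1] at hb ⊢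
      exact (pvFlagRun_both _ _ hb.1 hb.2).symm
    · rw [if_neg h, ih, hr.1]

-- the A component of a flag run
theorem pvFlagRun_fst (l : List ((Int × Int) × String)) :
    ∀ (A0 B0 : Int × Int) (fa fb : Bool),
      (pvFlagRun l ((A0, B0), (fa, fb))).1.1 =
        if fa then A0 else ((l.find? (fun c => c.2 == "A")).map Prod.fst).getD A0 := by
  induction l with
  | nil => intro A0 B0 fa fb; cases fa <;> simp [pvFlagRun]
  | cons c l ih =>
    intro A0 B0 fa fb
    by_cases hA : c.2 = "A"
    · have hA' : (c.2 == "A") = true := beq_iff_eq.mpr hA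
      have hB' : (c.2 == "B") = false := beq_eq_false_iff_ne.mpr (by rw [hA]; decide)
      cases fa <;> cases fb <;>
        simp [pvFlagRun, pvCStep, hA', hB', ih, List.find?]
    · have hA' : (c.2 == "A") = false := beq_eq_false_iff_ne.mpr hA
      by_cases hB : c.2 = "B"
      · have hB' : (c.2 == "B") = true := beq_iff_eq.mpr hB
        cases fa <;> cases fb <;>
          simp [pvFlagRun, pvCStep, hA', hB', ih, List.find?]
      · have hB' : (c.2 == "B") = false := beq_eq_false_iff_ne.mpr hB
        cases fa <;> cases fb <;>
          simp [pvFlagRun, pvCStep, hA', hB', ih, List.find?]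

-- the B component of a flag run
theorem pvFlagRun_snd (l : List ((Int × Int) × String)) :
    ∀ (A0 B0 : Int × Int) (fa fb : Bool),
      (pvFlagRun l ((A0, B0), (fa, fb))).1.2 =
        if fb then B0 else ((l.find? (fun c => c.2 == "B")).map Prod.fst).getD B0 := by
  induction l with
  | nil => intro A0 B0 fa fb; cases fb <;> simp [pvFlagRun]
  | cons c l ih =>
    intro A0 B0 fa fb
    by_cases hA : c.2 = "A"
    · have hA' : (c.2 == "A") = true := beq_iff_eq.mpr hA
      have hB' : (c.2 == "B") = false := beq_eq_false_iff_ne.mpr (by rw [hA]; decide)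
      cases fa <;> cases fb <;>
        simp [pvFlagRun, pvCStep, hA', hB', ih, List.find?]
    · have hA' : (c.2 == "A") = false := beq_eq_false_iff_ne.mpr hA
      by_cases hB : c.2 = "B"
      · have hB' : (c.2 == "B") = true := beq_iff_eq.mpr hB
        cases fa <;> cases fb <;>
          simp [pvFlagRun, pvCStep, hA', hB', ih, List.find?]
      · have hB' : (c.2 == "B") = false := beq_eq_false_iff_ne.mpr hB
        cases fa <;> cases fb <;>
          simp [pvFlagRun, pvCStep, hA', hB', ih, List.find?]

-- ---------- A side ----------

-- cell-level version of A's update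
def pvAStep (st : (Int × Int) × (Int × Int)) (c : (Int × Int) × String) :
    (Int × Int) × (Int × Int) :=
  if c.2 = "A" then (c.1, st.2) else if c.2 = "B" then (st.1, c.1) else st

theorem foldl_flatMap {α β γ : Type} (f : α → List β) (g : γ → β → γ) :
    ∀ (l : List α) (s : γ),
      (l.flatMap f).foldl g s = l.foldl (fun s a => (f a).foldl g s) s := by
  intro l
  induction l with
  | nil => intro s; rfl
  | cons a l ih => intro s; simp [List.flatMap_cons, List.foldl_append, ih]

theorem pv_foldl_ext {α β : Type} {f g : β → α → β} (h : ∀ s a, f s a = g s a) :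
    ∀ (l : List α) (s : β), l.foldl f s = l.foldl g s := by
  have hfg : f = g := funext fun s => funext fun a => h s a
  intro l s; rw [hfg]

theorem getAB_eq_cellfold (matrix : List (List String)) :
    getAB matrix = (pvCellsUpTo matrix matrix.length).foldl pvAStep ((0, 0), (0, 0)) := by
  unfold getAB pvCellsUpTo
  rw [foldl_flatMap]
  refine pv_foldl_ext ?_ _ _
  intro st y
  simp only [pvRowCells, List.foldl_map]
  refine pv_foldl_ext ?_ _ _
  intro st' x
  simp [pvAStep]

-- a foldl that conditionally overwrites its state equals "last match, i.e. first match of the reverse"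
theorem foldl_overwrite {α β : Type} (P : α → Bool) (f : α → β) :
    ∀ (l : List α) (s : β),
      l.foldl (fun s a => if P a then f a else s) s =
        ((l.reverse.find? P).map f).getD s := by
  intro l
  induction l with
  | nil => intro s; rfl
  | cons a l ih =>
    intro s
    simp only [List.foldl_cons, List.reverse_cons, List.find?_append, ih]
    cases h : l.reverse.find? P with
    | some b => simp
    | none =>
      cases hP : P a <;> simp [hP, List.find?]

-- the paired overwrite fold splits into its two components
theorem foldl_astep_split (l : List ((Int × Int) × String)) (s : (Int × Int) × (Int × Int)) :
    l.foldl pvAStep s =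
      (l.foldl (fun p c => if (c.2 == "A") then c.1 else p) s.1,
       l.foldl (fun p c => if (c.2 == "B") then c.1 else p) s.2) := by
  induction l generalizing s with
  | nil => rfl
  | cons c l ih =>
    rw [List.foldl_cons, List.foldl_cons, List.foldl_cons, ih]
    have hsplit : ∀ (s : (Int × Int) × (Int × Int)), pvAStep s c =
        ((if (c.2 == "A") then c.1 else s.1), (if (c.2 == "B") then c.1 else s.2)) := by
      intro s
      by_cases hA : c.2 = "A"
      · have hB : ¬ c.2 = "B" := by rw [hA]; decide
        simp [pvAStep, hA]
      · by_cases hB : c.2 = "B" <;> simp [pvAStep, hA, hB]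
    rw [hsplit]

-- ===== VERDICT (by name: the statement is the Claim_ definition above) =====
theorem getAB_spec : Claim_equal_getAB := by
  intro matrix _
  unfold Spec_getAB getAB_alt
  rw [pvColLoop_eq, getAB_eq_cellfold, foldl_astep_split, foldl_overwrite, foldl_overwrite]
  have h1 := pvFlagRun_fst ((pvCellsUpTo matrix matrix.length).reverse) (0, 0) (0, 0) false false
  have h2 := pvFlagRun_snd ((pvCellsUpTo matrix matrix.length).reverse) (0, 0) (0, 0) false false
  simp only [if_neg (by decide : ¬ false = true)] at h1 h2
  rw [← h1, ← h2]
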